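-- pv_equiv track=rewrite | github.com/gxlarson/hindex | hindex/hindex.py | w_index
-- ===== SOURCE A (Python) =====
-- def w_index(in_list):
--     w = 0
--     if len(in_list) < 1:
--         return w
--     for i, count in enumerate(sorted(in_list, reverse=True)):
--         _w = w + 1
--         f = 10 * _w
--         if count >= f:
--             w += 1
--         else:
--             break
--     return w
-- ===== SOURCE B (Python) =====
-- def w_index(in_list):
--     # Bucket counting instead of sorting: element c supports every w <= c//10 (cap at n);
--     # scan w from n downward, accumulating how many elements have value >= 10*w.
--     n = len(in_list)
--     buckets = [0] * (n + 1)
--     for c in in_list: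
--         if c >= 10:
--             k = c // 10
--             buckets[k if k < n else n] += 1
--     s = 0
--     for w in range(n, 0, -1):
--         s += buckets[w]
--         if s >= w:
--             return w
--     return 0
-- ===== Notes on version B (the rewrite author's own statement) =====
-- stated objective: alternative
-- what changed: Replaces sort-then-prefix-scan (sorted descending, extend prefix while value >= 10*(i+1)) by a comparison-free bucket count of c//10 capped at n with a single downward accumulation; no sorting.
import Mathlib
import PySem

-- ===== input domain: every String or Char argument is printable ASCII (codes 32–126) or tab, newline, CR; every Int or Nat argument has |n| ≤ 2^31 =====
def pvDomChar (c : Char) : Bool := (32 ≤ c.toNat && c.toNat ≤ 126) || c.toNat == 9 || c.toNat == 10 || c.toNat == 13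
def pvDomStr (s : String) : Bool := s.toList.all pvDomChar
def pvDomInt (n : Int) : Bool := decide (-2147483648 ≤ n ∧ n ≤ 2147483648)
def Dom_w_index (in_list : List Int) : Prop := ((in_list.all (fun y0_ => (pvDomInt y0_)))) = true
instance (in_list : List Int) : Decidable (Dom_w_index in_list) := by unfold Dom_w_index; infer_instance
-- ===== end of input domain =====

-- B replaces A's sort-then-prefix-scan by a bucket count (c // 10 capped at n) with one downward accumulation (alternative algorithm, no sorting).

-- ===== PORT A =====
-- the 'for … else: break' over the sorted list: recursion stops (returns w) at the first failing element
def wIndexLoop : List Int → Int → Int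
  | [], w => w
  | count :: rest, w =>
      if 10 * (w + 1) ≤ count then wIndexLoop rest (w + 1) else w

def w_index (in_list : List Int) : Int :=
  if in_list.length < 1 then 0
  else wIndexLoop (PySem.List.sorted in_list (fun x => x) true) 0

-- ===== PORT B =====
-- body of Source B's first loop: buckets[k if k < n else n] += 1 for c >= 10
-- (the bucket index is provably in range 1..n, so pySetD/pyGetD never hit their defaults)
def wBucketStep (n : Nat) (b : List Int) (c : Int) : List Int :=
  if 10 ≤ c then
    let k := PySem.Int.floordiv c 10
    let idx : Int := if k < (n : Int) then k else (n : Int)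
    PySem.List.pySetD b idx (PySem.List.pyGetD b idx 0 + 1)
  else b

def wBuckets (n : Nat) (in_list : List Int) : List Int :=
  in_list.foldl (wBucketStep n) (List.replicate (n + 1) 0)

-- second loop of Source B: scan w = n, n-1, …, 1 accumulating s; return the first w with s ≥ w
def wScan (b : List Int) : List Int → Int → Int
  | [], _ => 0
  | w :: ws, s =>
      let s' := s + PySem.List.pyGetD b w 0
      if w ≤ s' then w else wScan b ws s'

def w_index_alt (in_list : List Int) : Int :=
  wScan (wBuckets in_list.length in_list)
        (PySem.List.pyRange (in_list.length : Int) 0 (-1)) 0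

-- ===== PRECONDITION & SPEC =====
def Spec_w_index (in_list : List Int) (out : Int) : Prop := out = w_index_alt in_list
instance (in_list : List Int) (out : Int) : Decidable (Spec_w_index in_list out) := by unfold Spec_w_index; infer_instance

-- ===== CLAIM (what is proved, stated in full; the proofs are below) =====
def Claim_equal_w_index : Prop := ∀ (in_list : List Int), Dom_w_index in_list → Spec_w_index in_list (w_index in_list)

-- ===== LEMMAS AND PROOFS =====

theorem wIndexLoop_ge (s : List Int) (w0 : Int) : w0 ≤ wIndexLoop s w0 := by
  induction s generalizing w0 with
  | nil => simp [wIndexLoop]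
  | cons c rest ih =>
      simp only [wIndexLoop]
      split
      · exact le_trans (by omega) (ih (w0 + 1))
      · exact le_refl _

theorem wIndexLoop_le (s : List Int) (w0 : Int) : wIndexLoop s w0 ≤ w0 + s.length := by
  induction s generalizing w0 with
  | nil => simp [wIndexLoop]
  | cons c rest ih =>
      simp only [wIndexLoop]
      split
      · have := ih (w0 + 1); simp only [List.length_cons]; push_cast at *; omega
      · simp only [List.length_cons]; push_cast; omega

-- core characterisation of A's loop on a descending list:
-- the top w values are all ≥ 10*(w0+w) exactly when the loop passes position w
theorem wIndexLoop_iff (s : List Int) (hs : s.Pairwise (fun a b => b ≤ a)) :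
    ∀ (w0 w : Int), 1 ≤ w → w ≤ (s.length : Int) →
      ((w ≤ (s.countP (fun c => decide (10 * (w0 + w) ≤ c)) : Int)) ↔ w0 + w ≤ wIndexLoop s w0) := by
  induction s with
  | nil => intro w0 w h1 h2; simp at h2; omega
  | cons c rest ih =>
      intro w0 w h1 h2
      have hhead : ∀ y ∈ rest, y ≤ c := (List.pairwise_cons.mp hs).1
      have hpw : rest.Pairwise (fun a b => b ≤ a) := (List.pairwise_cons.mp hs).2
      simp only [wIndexLoop]
      by_cases hc : 10 * (w0 + 1) ≤ c
      · rw [if_pos hc]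
        by_cases hw1 : w = 1
        · subst hw1
          constructor
          · intro _; have := wIndexLoop_ge rest (w0 + 1); omega
          · intro _
            rw [List.countP_cons, if_pos (decide_eq_true hc)]
            push_cast; omega
        · have hw2 : 2 ≤ w := by omega
          have hlen : w - 1 ≤ (rest.length : Int) := by
            simp only [List.length_cons] at h2; push_cast at h2 ⊢; omega
          have ihs := ih hpw (w0 + 1) (w - 1) (by omega) hlen
          have e : w0 + 1 + (w - 1) = w0 + w := by ring
          rw [e] at ihs
          rw [List.countP_cons]
          by_cases hpc : 10 * (w0 + w) ≤ c
          · simp only [decide_eq_true_eq, if_pos hpc]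
            rw [← ihs]; push_cast; omega
          · -- c fails the threshold, so every element of the list fails it: the count is 0
            have hall : rest.countP (fun x => decide (10 * (w0 + w) ≤ x)) = 0 := by
              refine List.countP_eq_zero.mpr ?_
              intro x hx
              simp only [decide_eq_true_eq]
              have := hhead x hx; omega
            simp only [decide_eq_true_eq, if_neg hpc]
            rw [hall] at ihs ⊢
            rw [← ihs]; omega
      · rw [if_neg hc]
        -- the head already fails 10*(w0+1) ≤ c, hence everything fails 10*(w0+w)
        have hall : (c :: rest).countP (fun x => decide (10 * (w0 + w) ≤ x)) = 0 := by
          refine List.countP_eq_zero.mpr ?_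
          intro x hx
          simp only [decide_eq_true_eq]
          rcases List.mem_cons.mp hx with h | h
          · omega
          · have := hhead x h; omega
        rw [hall]
        constructor
        · intro h; omega
        · intro h; omega

theorem sum_set_int (l : List Int) (i : Nat) (a : Int) (h : i < l.length) :
    (l.set i a).sum = l.sum - l[i] + a := by
  have hd : l.sum = (l.take i).sum + (l[i] + (l.drop (i+1)).sum) := by
    conv_lhs => rw [show l = l.take i ++ l[i] :: l.drop (i+1) by
      rw [← List.drop_eq_getElem_cons h, List.take_append_drop]]
    simp only [List.sum_append, List.sum_cons]
  rw [List.set_eq_take_append_cons_drop, if_pos h, List.sum_append, List.sum_cons, hd]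
  ring

theorem sum_drop_set_int (l : List Int) (j w : Nat) (v : Int) (hj : j < l.length) (hw : w ≤ j) :
    ((l.set j v).drop w).sum = (l.drop w).sum - l[j] + v := by
  rw [List.drop_set, if_neg (by omega)]
  have hlen : j - w < (l.drop w).length := by simp [List.length_drop]; omega
  rw [sum_set_int _ _ _ hlen]
  congr 1
  congr 1
  rw [List.getElem_drop]
  congr 1
  omega

theorem wBucketStep_length (n : Nat) (b : List Int) (c : Int) (hb : b.length = n + 1) :
    (wBucketStep n b c).length = n + 1 := by
  unfold wBucketStep
  split
  · next hc =>
    have hk : (1 : Int) ≤ PySem.Int.floordiv c 10 := by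
      rw [PySem.Int.le_floordiv_iff_mul_le (by omega)]; omega
    set idx : Int := if PySem.Int.floordiv c 10 < (n : Int) then PySem.Int.floordiv c 10 else (n : Int) with hidx
    have h0 : 0 ≤ idx := by rw [hidx]; split <;> omega
    rw [PySem.List.pySetD_of_nonneg _ _ h0, List.length_set, hb]
  · exact hb

theorem wBucketStep_drop_sum (n : Nat) (b : List Int) (c : Int) (w : Nat)
    (hb : b.length = n + 1) (hw1 : 1 ≤ w) (hwn : w ≤ n) :
    ((wBucketStep n b c).drop w).sum
      = (b.drop w).sum + (if 10 * (w : Int) ≤ c then 1 else 0) := by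
  unfold wBucketStep
  by_cases hc : 10 ≤ c
  · rw [if_pos hc]
    have hk : (1 : Int) ≤ PySem.Int.floordiv c 10 := by
      rw [PySem.Int.le_floordiv_iff_mul_le (by omega)]; omega
    set k : Int := PySem.Int.floordiv c 10 with hkdef
    set idx : Int := if k < (n : Int) then k else (n : Int) with hidx
    have h0 : 0 ≤ idx := by rw [hidx]; split <;> omega
    have hn : idx ≤ (n : Int) := by rw [hidx]; split <;> omega
    have hjlt : idx.toNat < b.length := by rw [hb]; omega
    -- the threshold test 10*w ≤ c is exactly «w ≤ idx»
    have hiff : 10 * (w : Int) ≤ c ↔ (w : Int) ≤ idx := by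
      rw [hidx]
      split
      · next hlt =>
          rw [hkdef, PySem.Int.le_floordiv_iff_mul_le (by omega)]
          constructor <;> intro h <;> omega
      · next hge =>
          constructor
          · intro _; omega
          · intro _
            have hck : k * 10 ≤ c := by
              rw [hkdef]
              have := (PySem.Int.le_floordiv_iff_mul_le (a := c) (b := 10) (q := k) (by omega)).mp
                (le_refl k)
              omega
            omega
    rw [PySem.List.pySetD_of_nonneg _ _ h0,
        PySem.List.pyGetD_eq_getElem _ _ h0 (by rw [hb]; omega)]
    by_cases hwi : (w : Int) ≤ idx
    · have hwj : w ≤ idx.toNat := by omega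
      rw [sum_drop_set_int _ _ _ _ hjlt hwj, if_pos (hiff.mpr hwi)]
      ring
    · have hwj : idx.toNat < w := by omega
      rw [List.drop_set, if_pos hwj, if_neg (by rw [hiff]; exact hwi)]
      ring
  · rw [if_neg hc, if_neg (by omega)]
    ring

theorem wBuckets_aux (n : Nat) (l : List Int) :
    ∀ b : List Int, b.length = n + 1 →
      (l.foldl (wBucketStep n) b).length = n + 1 ∧
      ∀ w : Nat, 1 ≤ w → w ≤ n →
        ((l.foldl (wBucketStep n) b).drop w).sum
          = (b.drop w).sum + (l.countP (fun c => decide (10 * (w : Int) ≤ c)) : Int) := by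
  induction l with
  | nil => intro b hb; simp [hb]
  | cons c rest ih =>
      intro b hb
      have hb' := wBucketStep_length n b c hb
      obtain ⟨hlen, hsum⟩ := ih (wBucketStep n b c) hb'
      refine ⟨by simpa using hlen, ?_⟩
      intro w hw1 hwn
      have := hsum w hw1 hwn
      simp only [List.foldl_cons] at *
      rw [this, wBucketStep_drop_sum n b c w hb hw1 hwn, List.countP_cons]
      by_cases hpc : 10 * (w : Int) ≤ c
      · simp only [decide_eq_true_eq, if_pos hpc]; push_cast; ring
      · simp only [decide_eq_true_eq, if_neg hpc]; push_cast; ring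

theorem wBuckets_length (n : Nat) (l : List Int) : (wBuckets n l).length = n + 1 :=
  (wBuckets_aux n l _ (by simp)).1

theorem wBuckets_suffix (n : Nat) (l : List Int) (w : Nat) (h1 : 1 ≤ w) (h2 : w ≤ n) :
    ((wBuckets n l).drop w).sum = (l.countP (fun c => decide (10 * (w : Int) ≤ c)) : Int) := by
  have := (wBuckets_aux n l _ (by simp : (List.replicate (n+1) (0:Int)).length = n + 1)).2 w h1 h2
  rw [wBuckets] at *
  rw [this, List.drop_replicate]
  simp

-- the downward scan returns r as soon as r ≤ k, given the counting characterisation of r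
theorem wScan_eq (b : List Int) (n : Nat) (hb : b.length = n + 1) (r : Int)
    (hr0 : 0 ≤ r)
    (hchar : ∀ w : Nat, 1 ≤ w → w ≤ n → (((w : Int) ≤ (b.drop w).sum) ↔ (w : Int) ≤ r)) :
    ∀ k : Nat, k ≤ n → r ≤ (k : Int) →
      wScan b (PySem.List.pyRange (k : Int) 0 (-1)) ((b.drop (k + 1)).sum) = r := by
  intro k
  induction k with
  | zero =>
      intro _ hrk
      rw [PySem.List.pyRange_neg_one_eq_nil (by omega)]
      simp only [wScan]
      omega
  | succ k ihk =>
      intro hkn hrk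
      have hcons : PySem.List.pyRange ((k + 1 : Nat) : Int) 0 (-1)
          = ((k + 1 : Nat) : Int) :: PySem.List.pyRange (((k + 1 : Nat) : Int) - 1) 0 (-1) :=
        PySem.List.pyRange_neg_one_cons (by push_cast; omega)
      rw [hcons]
      simp only [wScan]
      have hget : PySem.List.pyGetD b ((k + 1 : Nat) : Int) 0 = b[k + 1] := by
        rw [PySem.List.pyGetD_natCast]
        exact List.getD_eq_getElem _ _ (by omega)
      have hdrop : b.drop (k + 1) = b[k + 1] :: b.drop (k + 2) :=
        List.drop_eq_getElem_cons (by omega)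
      have hsum : (b.drop (k + 1 + 1)).sum + PySem.List.pyGetD b ((k + 1 : Nat) : Int) 0
          = (b.drop (k + 1)).sum := by
        rw [hget, hdrop, List.sum_cons]; ring
      rw [hsum]
      have hiff := hchar (k + 1) (by omega) hkn
      by_cases hcond : ((k + 1 : Nat) : Int) ≤ (b.drop (k + 1)).sum
      · rw [if_pos hcond]
        have : ((k + 1 : Nat) : Int) ≤ r := hiff.mp hcond
        push_cast at *; omega
      · rw [if_neg hcond]
        have hlt : ¬ ((k + 1 : Nat) : Int) ≤ r := fun h => hcond (hiff.mpr h)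
        have hstep : (((k + 1 : Nat) : Int) - 1) = (k : Int) := by push_cast; ring
        rw [hstep]
        exact ihk (by omega) (by push_cast at hlt ⊢; omega)

theorem w_index_spec' (in_list : List Int) : w_index in_list = w_index_alt in_list := by
  rcases in_list with _ | ⟨x, xs⟩
  · decide
  · set l := x :: xs with hl
    set n := l.length with hn
    have hn1 : 1 ≤ n := by rw [hn, hl]; simp
    set s := PySem.List.sorted l (fun x => x) true with hsrt
    set r := wIndexLoop s 0 with hr
    have hA : w_index l = r := by
      rw [w_index, if_neg (by rw [hl]; simp)]
    have hslen : s.length = n := by rw [hsrt, PySem.List.length_sorted, hn]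
    have hr0 : 0 ≤ r := wIndexLoop_ge s 0
    have hrn : r ≤ (n : Int) := by
      have := wIndexLoop_le s 0
      rw [hslen] at this; omega
    set b := wBuckets n l with hbdef
    have hb : b.length = n + 1 := wBuckets_length n l
    have hchar : ∀ w : Nat, 1 ≤ w → w ≤ n → (((w : Int) ≤ (b.drop w).sum) ↔ (w : Int) ≤ r) := by
      intro w hw1 hwn
      rw [hbdef, wBuckets_suffix n l w hw1 hwn]
      have hperm : s.Perm l := PySem.List.sorted_perm l (fun x => x) true
      rw [← hperm.countP_eq]
      have hpair : s.Pairwise (fun a b => b ≤ a) := PySem.List.sorted_pairwise_rev l (fun x => x)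
      have := wIndexLoop_iff s hpair 0 (w : Int) (by omega) (by rw [hslen]; omega)
      simpa using this
    have hfin := wScan_eq b n hb r hr0 hchar n (le_refl n) hrn
    have hdropnil : (b.drop (n + 1)).sum = 0 := by
      rw [List.drop_of_length_le (by omega)]; simp
    rw [hdropnil] at hfin
    rw [hA, w_index_alt, ← hn, ← hbdef, hfin]

-- ===== VERDICT (by name: the statement is the Claim_ definition above) =====
theorem w_index_spec : Claim_equal_w_index := by
  intro l _
  exact w_index_spec' l
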